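-- pv_equiv track=rewrite | github.com/EauDeData/pokept | league/sim/agents_backup/nash_equilibrium_agent.py | find_nash_equilibrium
-- ===== SOURCE A (Python) =====
-- def find_nash_equilibrium(payoff_matrix_our, payoff_matrix_opponent):
--     num_rows = len(payoff_matrix_our)
--     num_cols = len(payoff_matrix_our[0])
--
--     for i in range(num_rows):
--         for j in range(num_cols):
--             our_payoff = payoff_matrix_our[i][j]
--             opponent_payoff = payoff_matrix_opponent[i][j]
--
--             # Check if no player can unilaterally improve payoff
--             if all(payoff_matrix_our[x][j] <= our_payoff for x in range(num_rows)) \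
--                     and all(payoff_matrix_opponent[i][y] <= opponent_payoff for y in range(num_cols)):
--                 return i, j
-- ===== SOURCE B (Python) =====
-- def find_nash_equilibrium(payoff_matrix_our, payoff_matrix_opponent):
--     num_rows = len(payoff_matrix_our)
--     num_cols = len(payoff_matrix_our[0])
--     col_max = [max(payoff_matrix_our[i][j] for i in range(num_rows)) for j in range(num_cols)]
--     row_max = [max(payoff_matrix_opponent[i][j] for j in range(num_cols)) for i in range(num_rows)]
--     for i in range(num_rows):
--         for j in range(num_cols):
--             if payoff_matrix_our[i][j] == col_max[j] and payoff_matrix_opponent[i][j] == row_max[i]: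
--                 return i, j
--     return None
-- ===== Notes on version B (the rewrite author's own statement) =====
-- stated objective: alternative
-- what changed: Precompute each column's maximum of our payoffs and each row's maximum of opponent payoffs once, then a single row-major scan compares each cell against the two cached maxima, removing A's per-cell column and row rescans; Pre_ additionally excludes matrices with zero-length rows, where A returns None but B's max() over an empty row raises.
-- outside the precondition, e.g. on find_nash_equilibrium([[]], [[]]): A returns None, B raises ValueError
import Mathlib
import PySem

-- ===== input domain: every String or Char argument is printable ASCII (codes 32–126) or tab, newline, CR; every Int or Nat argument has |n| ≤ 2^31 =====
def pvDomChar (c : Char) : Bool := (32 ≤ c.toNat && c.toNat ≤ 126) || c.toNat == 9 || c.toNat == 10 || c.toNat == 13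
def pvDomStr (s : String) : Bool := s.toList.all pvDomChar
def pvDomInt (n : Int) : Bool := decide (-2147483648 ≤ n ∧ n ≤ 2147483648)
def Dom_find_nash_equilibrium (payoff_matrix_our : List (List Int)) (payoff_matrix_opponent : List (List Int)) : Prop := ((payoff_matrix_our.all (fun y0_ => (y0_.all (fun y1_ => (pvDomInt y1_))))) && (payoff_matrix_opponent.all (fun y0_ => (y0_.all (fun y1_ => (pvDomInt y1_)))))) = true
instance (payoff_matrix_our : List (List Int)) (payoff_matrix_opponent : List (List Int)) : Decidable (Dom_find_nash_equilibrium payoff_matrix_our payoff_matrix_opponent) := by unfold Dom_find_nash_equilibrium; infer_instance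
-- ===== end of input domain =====

-- ===== PORT A =====
-- shared indexing helper: m[i][j] (total form of Python indexing; Pre_ keeps indices in range)
def pvGet (m : List (List Int)) (i j : Int) : Int :=
  PySem.List.pyGetD (PySem.List.pyGetD m i []) j 0

def find_nash_equilibrium (payoff_matrix_our : List (List Int)) (payoff_matrix_opponent : List (List Int)) : Option (Int × Int) :=
  let num_rows : Int := payoff_matrix_our.length
  let num_cols : Int := (PySem.List.pyGetD payoff_matrix_our 0 []).length
  (PySem.List.pyRange 0 num_rows 1).findSome? (fun i =>
    (PySem.List.pyRange 0 num_cols 1).findSome? (fun j =>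
      let our_payoff := pvGet payoff_matrix_our i j
      let opponent_payoff := pvGet payoff_matrix_opponent i j
      if ((PySem.List.pyRange 0 num_rows 1).all (fun x => decide (pvGet payoff_matrix_our x j ≤ our_payoff)))
          && ((PySem.List.pyRange 0 num_cols 1).all (fun y => decide (pvGet payoff_matrix_opponent i y ≤ opponent_payoff)))
      then some (i, j) else none))

-- ===== PORT B =====
-- B: one-line honest summary — precompute column maxima (our) and row maxima (opponent) once, then a single row-major scan per cell instead of A's per-cell column+row rescans.
-- max(...) over a nonempty generator of ints (empty case unreachable under Pre_)
def pvMax (l : List Int) : Int :=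
  match l with
  | [] => 0
  | h :: t => t.foldl max h

def find_nash_equilibrium_alt (payoff_matrix_our : List (List Int)) (payoff_matrix_opponent : List (List Int)) : Option (Int × Int) :=
  let num_rows : Int := payoff_matrix_our.length
  let num_cols : Int := (PySem.List.pyGetD payoff_matrix_our 0 []).length
  let col_max : List Int := (PySem.List.pyRange 0 num_cols 1).map (fun j =>
    pvMax ((PySem.List.pyRange 0 num_rows 1).map (fun i => pvGet payoff_matrix_our i j)))
  let row_max : List Int := (PySem.List.pyRange 0 num_rows 1).map (fun i =>
    pvMax ((PySem.List.pyRange 0 num_cols 1).map (fun j => pvGet payoff_matrix_opponent i j)))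
  (PySem.List.pyRange 0 num_rows 1).findSome? (fun i =>
    (PySem.List.pyRange 0 num_cols 1).findSome? (fun j =>
      if (pvGet payoff_matrix_our i j == PySem.List.pyGetD col_max j 0)
          && (pvGet payoff_matrix_opponent i j == PySem.List.pyGetD row_max i 0)
      then some (i, j) else none))

-- ===== PRECONDITION & SPEC =====
-- Pre_ excludes the inputs on which Python A raises IndexError (the empty matrix and
-- matrices with a row shorter than our[0] or with fewer opponent rows than our rows: A indexes
-- our[x][j] and opp[i][y] for all x,i < len(our) and j,y < len(our[0]))
-- and additionally matrices with zero-length rows, on which A returns None but B's max() over an empty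
-- row raises ValueError.
def Pre_find_nash_equilibrium (payoff_matrix_our : List (List Int)) (payoff_matrix_opponent : List (List Int)) : Prop :=
  payoff_matrix_our ≠ [] ∧
  payoff_matrix_our.headI ≠ [] ∧
  payoff_matrix_our.length ≤ payoff_matrix_opponent.length ∧
  (∀ row ∈ payoff_matrix_our, payoff_matrix_our.headI.length ≤ row.length) ∧
  (∀ row ∈ payoff_matrix_opponent.take payoff_matrix_our.length, payoff_matrix_our.headI.length ≤ row.length)
instance (payoff_matrix_our : List (List Int)) (payoff_matrix_opponent : List (List Int)) : Decidable (Pre_find_nash_equilibrium payoff_matrix_our payoff_matrix_opponent) := by unfold Pre_find_nash_equilibrium; infer_instance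
def pvWitness_find_nash_equilibrium : List (List Int) × List (List Int) := ([[1, 0], [0, 0]], [[2, 1], [0, 3]])
def Spec_find_nash_equilibrium (payoff_matrix_our : List (List Int)) (payoff_matrix_opponent : List (List Int)) (out : Option (Int × Int)) : Prop := out = find_nash_equilibrium_alt payoff_matrix_our payoff_matrix_opponent
instance (payoff_matrix_our : List (List Int)) (payoff_matrix_opponent : List (List Int)) (out : Option (Int × Int)) : Decidable (Spec_find_nash_equilibrium payoff_matrix_our payoff_matrix_opponent out) := by unfold Spec_find_nash_equilibrium; infer_instance

-- ===== CLAIM (what is proved, stated in full; the proofs are below) =====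
def Claim_equal_find_nash_equilibrium : Prop := ∀ (payoff_matrix_our : List (List Int)) (payoff_matrix_opponent : List (List Int)), Dom_find_nash_equilibrium payoff_matrix_our payoff_matrix_opponent → Pre_find_nash_equilibrium payoff_matrix_our payoff_matrix_opponent → Spec_find_nash_equilibrium payoff_matrix_our payoff_matrix_opponent (find_nash_equilibrium payoff_matrix_our payoff_matrix_opponent)

-- ===== LEMMAS AND PROOFS =====

-- generic: every element is at most pvMax, and pvMax is attained
lemma pv_le_pvMax (l : List Int) (x : Int) (hx : x ∈ l) : x ≤ pvMax l := by
  cases l with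
  | nil => cases hx
  | cons h t =>
    show x ≤ t.foldl max h
    rcases List.mem_cons.mp hx with rfl | hm
    · exact (PySem.List.le_foldl_max t x).1
    · exact (PySem.List.le_foldl_max t h).2 x hm

lemma pvMax_mem (l : List Int) (hl : l ≠ []) : pvMax l ∈ l := by
  cases l with
  | nil => exact absurd rfl hl
  | cons h t =>
    show t.foldl max h ∈ h :: t
    clear hl
    induction t generalizing h with
    | nil => simp
    | cons a t ih =>
      show t.foldl max (max h a) ∈ h :: a :: t
      rcases List.mem_cons.mp (ih (max h a)) with he | hm
      · rcases max_choice h a with h1 | h1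
        · rw [he, h1]; exact List.mem_cons_self
        · rw [he, h1]; simp
      · simp [hm]

-- "x ≤ v for every x of l" is "v is the maximum of l", for v ∈ l
lemma pv_all_le_iff_eq_pvMax (l : List Int) (v : Int) (hv : v ∈ l) :
    (l.all (fun x => decide (x ≤ v))) = (v == pvMax l) := by
  by_cases h : v = pvMax l
  · simp only [h, BEq.rfl, List.all_eq_true, decide_eq_true_eq]
    intro x hx; exact h ▸ pv_le_pvMax l x hx
  · have hne : l ≠ [] := by rintro rfl; cases hv
    have : ¬ (pvMax l ≤ v) := fun hle =>
      h (le_antisymm (pv_le_pvMax l v hv) hle)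
    have hb : (v == pvMax l) = false := beq_eq_false_iff_ne.mpr h
    rw [hb, List.all_eq_false]
    exact ⟨pvMax l, pvMax_mem l hne, by simpa using this⟩

-- A's inner all-scan equals B's comparison with the cached maximum
lemma pv_all_le_eq_max (R : List Int) (f : Int → Int) (i : Int) (hi : i ∈ R) :
    (R.all (fun x => decide (f x ≤ f i))) = (f i == pvMax (R.map f)) := by
  have h := pv_all_le_iff_eq_pvMax (R.map f) (f i) (List.mem_map_of_mem hi)
  simpa [List.all_map, Function.comp] using h

lemma pv_findSome?_congr {α β : Type} (l : List α) (f g : α → Option β)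
    (h : ∀ a ∈ l, f a = g a) : l.findSome? f = l.findSome? g := by
  induction l with
  | nil => rfl
  | cons a t ih =>
    simp only [List.findSome?_cons, h a List.mem_cons_self,
      ih (fun x hx => h x (List.mem_cons_of_mem a hx))]

-- ===== VERDICT (by name: the statement is the Claim_ definition above) =====
theorem find_nash_equilibrium_spec : Claim_equal_find_nash_equilibrium := by
  intro our opp _ _
  unfold Spec_find_nash_equilibrium
  simp only [find_nash_equilibrium, find_nash_equilibrium_alt]
  apply pv_findSome?_congr
  intro i hi
  apply pv_findSome?_congr
  intro j hj
  obtain ⟨hi0, hi1⟩ : 0 ≤ i ∧ i < (our.length : Int) := by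
    simpa [PySem.List.mem_pyRange_one] using hi
  obtain ⟨hj0, hj1⟩ : 0 ≤ j ∧ j < ((PySem.List.pyGetD our 0 []).length : Int) := by
    simpa [PySem.List.mem_pyRange_one] using hj
  simp only [pv_all_le_eq_max _ (fun x => pvGet our x j) i hi,
    pv_all_le_eq_max _ (fun y => pvGet opp i y) j hj,
    PySem.List.pyGetD_map_pyRange_of_nonneg _ _ _ _ hj0 hj1,
    PySem.List.pyGetD_map_pyRange_of_nonneg _ _ _ _ hi0 hi1]
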